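-- pv_equiv track=rewrite | github.com/skyying/aoc2021 | src/day10/day10.py | calc_closing_score
-- ===== SOURCE A (Python) =====
-- def calc_closing_score(closings):
--     bracket_score = {
--         ")": 1,
--         "]": 2,
--         "}": 3,
--         ">": 4
--     }
--     score = 0
--     for closing in closings:
--         score = score * 5 + bracket_score[closing]
--     return score
-- ===== SOURCE B (Python) =====
-- def calc_closing_score(closings):
--     n = len(closings)
--     return sum((")]}>".index(c) + 1) * 5 ** (n - 1 - i)
--                for i, c in enumerate(closings))
-- ===== Notes on version B (the rewrite author's own statement) =====
-- stated objective: alternative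
-- what changed: Replaces the stateful Horner loop with a dict lookup by a stateless weighted sum: each closing's digit is obtained by string indexing in ")]}>"+1 and multiplied by its explicit place value 5**(n-1-i).
import Mathlib
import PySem

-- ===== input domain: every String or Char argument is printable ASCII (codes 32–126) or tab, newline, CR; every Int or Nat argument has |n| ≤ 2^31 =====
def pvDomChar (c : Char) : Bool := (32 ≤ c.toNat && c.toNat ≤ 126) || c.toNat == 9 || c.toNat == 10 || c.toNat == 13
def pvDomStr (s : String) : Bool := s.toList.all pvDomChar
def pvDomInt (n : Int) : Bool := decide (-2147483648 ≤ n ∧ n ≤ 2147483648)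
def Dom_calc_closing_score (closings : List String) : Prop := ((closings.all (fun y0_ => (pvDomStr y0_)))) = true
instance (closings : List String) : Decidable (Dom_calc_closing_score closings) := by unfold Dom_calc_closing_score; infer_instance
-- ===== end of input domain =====

-- B replaces A's stateful Horner loop with a dict by a stateless weighted sum over enumerate:
-- digit from string indexing in ")]}>" plus 1, times the explicit place value 5^(n-1-i); alternative decomposition, same cost.

-- ===== PORT A =====
-- Horner loop: score = score*5 + bracket_score[closing].  The dict lookup bracket_score[closing]
-- raises KeyError for other strings; Pre_ excludes those, so getD's default 0 is never reached on Pre_.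
def calc_closing_score (closings : List String) : Int :=
  let bracket_score : PySem.Dict String Int :=
    PySem.Dict.ofList [(")", 1), ("]", 2), ("}", 3), (">", 4)]
  closings.foldl (fun score closing => score * 5 + bracket_score.getD closing 0) 0

-- ===== PORT B =====
-- sum((")]}>".index(c)+1) * 5**(n-1-i) for i, c in enumerate(closings)).
-- str.index raises ValueError for non-brackets (Pre_ excludes those); Str.find returns -1 there.
-- The Python exponent n-1-i is nonnegative (i < n), so .toNat is exact.
def calc_closing_score_alt (closings : List String) : Int :=
  let n : Int := closings.length
  ((PySem.List.enumerate closings).map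
    (fun ic => (PySem.Str.find ")]}>" ic.2 + 1) * (5 : Int) ^ (n - 1 - ic.1).toNat)).sum

-- ===== PRECONDITION & SPEC =====
-- Pre_ excludes exactly the inputs where Python A raises KeyError: any element not a closing bracket.
def Pre_calc_closing_score (closings : List String) : Prop :=
  ∀ s ∈ closings, s ∈ ([")", "]", "}", ">"] : List String)
instance (closings : List String) : Decidable (Pre_calc_closing_score closings) := by
  unfold Pre_calc_closing_score; infer_instance

def pvWitness_calc_closing_score : List String := [")", "}", ">", "]"]

def Spec_calc_closing_score (closings : List String) (out : Int) : Prop := out = calc_closing_score_alt closings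
instance (closings : List String) (out : Int) : Decidable (Spec_calc_closing_score closings out) := by unfold Spec_calc_closing_score; infer_instance

-- ===== CLAIM =====
def Claim_equal_calc_closing_score : Prop := ∀ (closings : List String), Dom_calc_closing_score closings → Pre_calc_closing_score closings → Spec_calc_closing_score closings (calc_closing_score closings)

-- ===== LEMMAS AND PROOFS =====

-- Place-value sum, digits d, most significant first.
def pvVal (d : String → Int) : List String → Int
  | [] => 0
  | c :: t => d c * 5 ^ t.length + pvVal d t

lemma foldl_A_eq (d : String → Int) (xs : List String) :
    ∀ (s : Int), xs.foldl (fun score c => score * 5 + d c) s = s * 5 ^ xs.length + pvVal d xs := by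
  induction xs with
  | nil => intro s; simp [pvVal]
  | cons c t ih =>
      intro s
      simp only [List.foldl_cons, ih, pvVal, List.length_cons, pow_succ]
      ring

lemma sum_B_eq (d : String → Int) (t : List String) :
    ∀ (s : Int),
      ((PySem.List.enumerate t s).map
        (fun ic => d ic.2 * (5 : Int) ^ ((s + t.length) - 1 - ic.1).toNat)).sum = pvVal d t := by
  induction t with
  | nil => intro s; simp [PySem.List.enumerate_nil, pvVal]
  | cons c t ih =>
      intro s
      rw [PySem.List.enumerate_cons]
      simp only [List.map_cons, List.sum_cons, pvVal, List.length_cons]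
      push_cast
      have h1 : ((s + ((t.length : Int) + 1)) - 1 - s).toNat = t.length := by omega
      have h2 : ((PySem.List.enumerate t (s + 1)).map
          (fun ic => d ic.2 * (5 : Int) ^ ((s + ((t.length : Int) + 1)) - 1 - ic.1).toNat)).sum
          = pvVal d t := by
        rw [← ih (s + 1)]
        congr 1
        apply List.map_congr_left
        intro p _
        congr 2
        omega
      rw [h1, h2]

-- The two digit functions agree on the four closing brackets.
lemma digit_agree (c : String) (hc : c ∈ ([")", "]", "}", ">"] : List String)) :
    (PySem.Dict.ofList [((")" : String), (1 : Int)), ("]", 2), ("}", 3), (">", 4)]).getD c 0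
      = PySem.Str.find ")]}>" c + 1 := by
  fin_cases hc <;> decide

lemma pvVal_agree (xs : List String) (h : ∀ s ∈ xs, s ∈ ([")", "]", "}", ">"] : List String)) :
    pvVal (fun c => (PySem.Dict.ofList [((")" : String), (1 : Int)), ("]", 2), ("}", 3), (">", 4)]).getD c 0) xs
      = pvVal (fun c => PySem.Str.find ")]}>" c + 1) xs := by
  induction xs with
  | nil => rfl
  | cons c t ih =>
      simp only [pvVal]
      rw [digit_agree c (h c (List.mem_cons_self ..)),
        ih (fun s hs => h s (List.mem_cons_of_mem _ hs))]

-- ===== VERDICT =====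
theorem calc_closing_score_spec : Claim_equal_calc_closing_score := by
  intro closings _ hpre
  unfold Spec_calc_closing_score calc_closing_score calc_closing_score_alt
  have hB := sum_B_eq (fun c => PySem.Str.find ")]}>" c + 1) closings 0
  simp only [zero_add] at hB
  rw [foldl_A_eq, hB, pvVal_agree closings hpre]
  ring
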